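-- pv_equiv track=rewrite | github.com/helpenrod/phd_vrp_project | experiments/alg2_vrptw/vrptw_twonly_instance.py | split_chromosome
-- ===== SOURCE A (Python) =====
-- DEPOT = 0
--
-- def split_chromosome(chrom):
--     routes, cur = [], []
--     for g in chrom:
--         if g == DEPOT:
--             if cur:
--                 routes.append(cur)
--                 cur = []
--         else:
--             cur.append(g)
--     if cur:
--         routes.append(cur)
--     return routes
-- ===== SOURCE B (Python) =====
-- DEPOT = 0
--
-- def split_chromosome(chrom):
--     # run-based scan: skip depot markers, slice out each maximal non-depot run
--     routes = []
--     i, n = 0, len(chrom)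
--     while i < n:
--         if chrom[i] == DEPOT:
--             i += 1
--         else:
--             j = i + 1
--             while j < n and chrom[j] != DEPOT:
--                 j += 1
--             routes.append(chrom[i:j])
--             i = j
--     return routes
-- ===== Notes on version B (the rewrite author's own statement) =====
-- stated objective: alternative
-- what changed: Replaces the element-by-element accumulator with end-of-list flush by a run-based scan that skips depot markers and slices out each maximal non-depot run directly.
import Mathlib
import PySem

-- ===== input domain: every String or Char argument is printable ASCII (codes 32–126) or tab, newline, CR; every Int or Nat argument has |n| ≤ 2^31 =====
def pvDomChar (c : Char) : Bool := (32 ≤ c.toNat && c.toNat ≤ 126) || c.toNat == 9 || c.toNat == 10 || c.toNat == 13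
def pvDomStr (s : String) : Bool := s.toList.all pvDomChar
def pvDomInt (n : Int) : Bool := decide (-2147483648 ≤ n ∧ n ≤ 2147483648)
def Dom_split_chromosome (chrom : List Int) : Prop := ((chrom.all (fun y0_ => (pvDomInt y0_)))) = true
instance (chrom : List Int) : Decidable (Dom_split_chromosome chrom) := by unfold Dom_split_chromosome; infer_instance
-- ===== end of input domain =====

-- B replaces A's element-wise accumulator/flush loop with a run-based scan (skip depots, emit maximal non-depot runs); same result.


-- ===== PORT A =====
-- A: fold over the elements with state (routes, cur); flush cur on a depot and at the end.
def split_chromosome (chrom : List Int) : List (List Int) :=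
  let s := chrom.foldl
    (fun (s : List (List Int) × List Int) g =>
      if g = 0 then (if s.2 ≠ [] then (s.1 ++ [s.2], ([] : List Int)) else s)
      else (s.1, s.2 ++ [g]))
    (([] : List (List Int)), ([] : List Int))
  if s.2 ≠ [] then s.1 ++ [s.2] else s.1

-- ===== PORT B =====
-- B: run-based scan — skip a depot, else the run is the head plus the longest non-depot prefix of the tail.
def split_chromosome_alt : List Int → List (List Int)
  | [] => []
  | x :: xs =>
    if x = 0 then split_chromosome_alt xs
    else (x :: xs.takeWhile (· ≠ 0)) :: split_chromosome_alt (xs.dropWhile (· ≠ 0))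
termination_by xs => xs.length
decreasing_by
  · simp
  · exact Nat.lt_succ_of_le (xs.length_dropWhile_le _)

-- ===== PRECONDITION & SPEC =====
def Spec_split_chromosome (chrom : List Int) (out : List (List Int)) : Prop := out = split_chromosome_alt chrom
instance (chrom : List Int) (out : List (List Int)) : Decidable (Spec_split_chromosome chrom out) := by unfold Spec_split_chromosome; infer_instance

-- ===== CLAIM (what is proved, stated in full; the proofs are below) =====
def Claim_equal_split_chromosome : Prop := ∀ (chrom : List Int), Dom_split_chromosome chrom → Spec_split_chromosome chrom (split_chromosome chrom)

-- ===== LEMMAS AND PROOFS =====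

-- a nonempty all-nonzero list forms exactly one run
lemma alt_all_nonzero (c : Int) (cs : List Int) (h : ∀ x ∈ cs, x ≠ 0) (hc : c ≠ 0) :
    split_chromosome_alt (c :: cs) = [c :: cs] := by
  have hb : ∀ x ∈ cs, (fun x => decide (x ≠ 0)) x = true := by simpa using h
  rw [split_chromosome_alt, if_neg hc, List.takeWhile_eq_self_iff.2 hb,
    List.dropWhile_eq_nil_iff.2 (by simpa using h)]
  simp [split_chromosome_alt]

lemma alt_run_zero (c : Int) (cs rest : List Int) (h : ∀ x ∈ cs, x ≠ 0) (hc : c ≠ 0) :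
    split_chromosome_alt (c :: (cs ++ 0 :: rest)) = (c :: cs) :: split_chromosome_alt rest := by
  have hb : ∀ x ∈ cs, (fun x => decide (x ≠ 0)) x = true := by simpa using h
  have ht : (cs ++ 0 :: rest).takeWhile (fun x => decide (x ≠ 0)) = cs := by
    rw [List.takeWhile_append, List.takeWhile_eq_self_iff.2 hb]
    simp
  have hd : (cs ++ 0 :: rest).dropWhile (fun x => decide (x ≠ 0)) = 0 :: rest := by
    rw [List.dropWhile_append, List.dropWhile_eq_nil_iff.2 (by simpa using h)]
    simp
  rw [split_chromosome_alt, if_neg hc, ht, hd, split_chromosome_alt]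
  simp

lemma alt_cons_zero (xs : List Int) : split_chromosome_alt (0 :: xs) = split_chromosome_alt xs := by
  rw [split_chromosome_alt]; simp

-- loop invariant for A's fold: pending cur (all nonzero) merges into the first run of the rest
lemma loopA (xs : List Int) : ∀ (routes : List (List Int)) (cur : List Int),
    (∀ x ∈ cur, x ≠ 0) →
    (let s := xs.foldl
        (fun (s : List (List Int) × List Int) g =>
          if g = 0 then (if s.2 ≠ [] then (s.1 ++ [s.2], ([] : List Int)) else s)
          else (s.1, s.2 ++ [g])) (routes, cur)
     if s.2 ≠ [] then s.1 ++ [s.2] else s.1) = routes ++ split_chromosome_alt (cur ++ xs) := by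
  induction xs with
  | nil =>
    intro routes cur hcur
    cases cur with
    | nil => simp [split_chromosome_alt]
    | cons c cs =>
      have hc : c ≠ 0 := hcur c (by simp)
      have hcs : ∀ x ∈ cs, x ≠ 0 := fun x hx => hcur x (by simp [hx])
      simp [List.foldl, alt_all_nonzero c cs hcs hc]
  | cons g xs ih =>
    intro routes cur hcur
    by_cases hg : g = 0
    · subst hg
      cases cur with
      | nil =>
        rw [List.nil_append, alt_cons_zero]
        simp only [List.foldl_cons]
        simpa using ih routes [] (by simp)
      | cons c cs =>
        have hc : c ≠ 0 := hcur c (by simp)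
        have hcs : ∀ x ∈ cs, x ≠ 0 := fun x hx => hcur x (by simp [hx])
        have ih' := ih (routes ++ [c :: cs]) [] (by simp)
        simp only [List.nil_append] at ih'
        rw [List.cons_append, alt_run_zero c cs xs hcs hc]
        simp only [List.foldl_cons]
        rw [if_pos trivial, if_pos (show c :: cs ≠ [] from by simp),
           ih', List.append_assoc, List.singleton_append]
    · have hcur' : ∀ x ∈ cur ++ [g], x ≠ 0 := by
        intro x hx
        rcases List.mem_append.1 hx with h | h
        · exact hcur x h
        · simp at h; simpa [h] using hg
      have := ih routes (cur ++ [g]) hcur'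
      simp only [List.foldl_cons]
      rw [if_neg hg, this]
      simp

-- ===== VERDICT (by name: the statement is the Claim_ definition above) =====
theorem split_chromosome_spec : Claim_equal_split_chromosome := by
  intro chrom _
  show split_chromosome chrom = split_chromosome_alt chrom
  have := loopA chrom [] [] (by simp)
  simpa [split_chromosome] using this
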